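-- pv_equiv track=rewrite | github.com/vivasvan1/balatro-dqn-agent | src/balatro_agent/balatro_gym_v2.py | _decode_action
-- ===== SOURCE A (Python) =====
-- from typing import List, Tuple, Dict, Any, Optional
--
-- def _decode_action(action: int) -> Tuple[str, List[int]]:
--     """Decode action into action_type and card_indices"""
--     from itertools import combinations
--
--     # Calculate how many valid combinations there are
--     valid_combinations = 0
--     for r in range(1, 6):  # 1 to 5 cards
--         valid_combinations += len(list(combinations(range(8), r)))
--
--     # Determine action type
--     if action < valid_combinations:
--         action_type = "play"
--         action_index = action
--     else:
--         action_type = "discard"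
--         action_index = action - valid_combinations
--
--     # Find the card combination for this action index
--     card_indices = []
--     current_index = 0
--
--     for r in range(1, 6):  # 1 to 5 cards
--         combinations_r = list(combinations(range(8), r))
--         if current_index <= action_index < current_index + len(combinations_r):
--             # Found the right combination size
--             combo_index = action_index - current_index
--             card_indices = list(combinations_r[combo_index])
--             break
--         current_index += len(combinations_r)
--
--     return action_type, card_indices
-- ===== SOURCE B (Python) =====
-- from typing import List, Tuple
--
-- def _decode_action(action: int) -> Tuple[str, List[int]]:
--     """Decode action into action_type and card_indices"""
--     from itertools import combinations
--
--     all_combos = [c for r in range(1, 6) for c in combinations(range(8), r)]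
--     total = len(all_combos)
--     if action < total:
--         action_type, action_index = "play", action
--     else:
--         action_type, action_index = "discard", action - total
--     if 0 <= action_index < total:
--         return action_type, list(all_combos[action_index])
--     return action_type, []
-- ===== Notes on version B (the rewrite author's own statement) =====
-- stated objective: simpler
-- what changed: Replaces the bucket-by-bucket offset search (one combinations list per size r with a running current_index) by one flat list of all combinations in the same r=1..5 order, indexed directly under a single bounds guard.
import Mathlib
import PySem

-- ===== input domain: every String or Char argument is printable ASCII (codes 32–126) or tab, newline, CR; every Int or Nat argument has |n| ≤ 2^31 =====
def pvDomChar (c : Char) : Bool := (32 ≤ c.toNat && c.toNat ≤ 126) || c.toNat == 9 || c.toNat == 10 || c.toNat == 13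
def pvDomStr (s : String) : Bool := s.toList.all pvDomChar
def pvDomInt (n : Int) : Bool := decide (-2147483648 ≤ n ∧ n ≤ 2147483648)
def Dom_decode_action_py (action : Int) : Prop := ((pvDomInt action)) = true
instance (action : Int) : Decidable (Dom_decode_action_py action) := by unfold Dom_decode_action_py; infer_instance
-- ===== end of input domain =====

-- B replaces A's per-size bucket search with a running offset by direct indexing into one
-- flat list of all combinations (same r = 1..5 lexicographic order); objective: simpler.

-- ===== PORT A =====
-- itertools.combinations(xs, r) in lexicographic order (shared: both Pythons call it)
def pvCombos : List Int → Nat → List (List Int)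
  | _, 0 => [[]]
  | [], _ + 1 => []
  | x :: xs, r + 1 => (pvCombos xs r).map (fun c => x :: c) ++ pvCombos xs (r + 1)

-- list(range(8))
def pvRange8 : List Int := [0, 1, 2, 3, 4, 5, 6, 7]

-- A's first loop: valid_combinations summed over r in range(1, 6)
def pvValid : Int := [1, 2, 3, 4, 5].foldl (fun acc r => acc + ((pvCombos pvRange8 r).length : Int)) 0

-- A's second loop: for r in range(1, 6) with current_index accumulator and break;
-- combinations_r[combo_index] is guarded by the branch condition, so getD is exact.
def pvFindA : List Nat → Int → Int → List Int
  | [], _, _ => []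
  | r :: rs, cur, idx =>
    let cr := pvCombos pvRange8 r
    if cur ≤ idx ∧ idx < cur + (cr.length : Int) then
      cr.getD (idx - cur).toNat []
    else
      pvFindA rs (cur + (cr.length : Int)) idx

def decode_action_py (action : Int) : String × List Int :=
  let p := if action < pvValid then ("play", action) else ("discard", action - pvValid)
  (p.1, pvFindA [1, 2, 3, 4, 5] 0 p.2)

-- ===== PORT B =====
def pvAllCombos : List (List Int) := [1, 2, 3, 4, 5].flatMap (pvCombos pvRange8)

def pvTotal : Int := (pvAllCombos.length : Int)

def decode_action_py_alt (action : Int) : String × List Int :=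
  let p := if action < pvTotal then ("play", action) else ("discard", action - pvTotal)
  if 0 ≤ p.2 ∧ p.2 < pvTotal then (p.1, pvAllCombos.getD p.2.toNat []) else (p.1, [])

-- ===== PRECONDITION & SPEC =====
def Spec_decode_action_py (action : Int) (out : String × List Int) : Prop := out = decode_action_py_alt action
instance (action : Int) (out : String × List Int) : Decidable (Spec_decode_action_py action out) := by unfold Spec_decode_action_py; infer_instance

-- ===== CLAIM (what is proved, stated in full; the proofs are below) =====
def Claim_equal_decode_action_py : Prop := ∀ (action : Int), Dom_decode_action_py action → Spec_decode_action_py action (decode_action_py action)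

-- ===== LEMMAS AND PROOFS =====

-- A's bucket search over rs equals guarded direct indexing into the flattened bucket list.
theorem pvFindA_eq (rs : List Nat) (cur idx : Int) :
    pvFindA rs cur idx =
      (if 0 ≤ idx - cur ∧ idx - cur < ((rs.flatMap (pvCombos pvRange8)).length : Int)
       then (rs.flatMap (pvCombos pvRange8)).getD (idx - cur).toNat []
       else []) := by
  induction rs generalizing cur with
  | nil =>
    simp only [pvFindA, List.flatMap_nil, List.length_nil, Nat.cast_zero]
    rw [if_neg (by omega)]
  | cons r rs ih =>
    simp only [pvFindA, List.flatMap_cons, List.length_append, Nat.cast_add]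
    by_cases h : cur ≤ idx ∧ idx < cur + ((pvCombos pvRange8 r).length : Int)
    · rw [if_pos h, if_pos (by omega)]
      rw [List.getD_eq_getElem?_getD, List.getD_eq_getElem?_getD,
          List.getElem?_append_left (by omega)]
    · rw [if_neg h, ih]
      split_ifs with h1 h2 h2
      · rw [List.getD_eq_getElem?_getD, List.getD_eq_getElem?_getD,
            List.getElem?_append_right (by omega)]
        congr 2
        omega
      · exfalso; omega
      · exfalso; omega
      · rfl

set_option maxRecDepth 10000 in
theorem pvValid_eq : pvValid = pvTotal := by decide

theorem pvTotal_eq : pvTotal = ((([1, 2, 3, 4, 5] : List Nat).flatMap (pvCombos pvRange8)).length : Int) := rfl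

-- ===== VERDICT (by name: the statement is the Claim_ definition above) =====
theorem decode_action_py_spec : Claim_equal_decode_action_py := by
  intro action _
  unfold Spec_decode_action_py decode_action_py decode_action_py_alt
  rw [pvValid_eq]
  by_cases hlt : action < pvTotal
  · simp only [if_pos hlt, pvFindA_eq, sub_zero, ← pvTotal_eq]
    split_ifs <;> rfl
  · simp only [if_neg hlt, pvFindA_eq, sub_zero, ← pvTotal_eq]
    split_ifs <;> rfl
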